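-- pv_equiv track=rewrite | github.com/Just1a2Noob/bootdev | static_website_generator/src/markdown_blocks.py | text_to_header_type
-- ===== SOURCE A (Python) =====
-- def text_to_header_type(text):
--     """
--     Detects the header type (h1-h6) from markdown syntax.
--     Returns the HTML header tag name or None if not a header.
--
--     Args:
--         text (str): The text to analyze
--
--     Returns:
--         str or None: HTML header tag (h1-h6) or None if not a header
--     """
--     # Strip whitespace
--     text = text.strip()
--
--     # Check if text starts with #
--     if not text.startswith("#"):
--         return None
--
--     # Count consecutive # symbols at start
--     hash_count = 0
--     for char in text:
--         if char == "#":
--             hash_count += 1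
--         else:
--             break
--
--     if hash_count > 6:
--         return None
--
--     # Check if there's a space after the # symbols
--     if len(text) <= hash_count or text[hash_count] != " ":
--         return None
--
--     return f"h{hash_count}"
-- ===== SOURCE B (Python) =====
-- def text_to_header_type(text):
--     """
--     Detects the header type (h1-h6) from markdown syntax.
--     Returns the HTML header tag name or None if not a header.
--     """
--     text = text.strip()
--     prefix, sep, _rest = text.partition(" ")
--     if sep != " ":
--         return None
--     n = len(prefix)
--     if n < 1 or n > 6 or any(c != "#" for c in prefix):
--         return None
--     return f"h{n}"
-- ===== Notes on version B (the rewrite author's own statement) =====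
-- stated objective: simpler
-- what changed: Instead of counting leading hashes char-by-char and then indexing the char after them, B splits the stripped text at the first space via str.partition and validates the whole prefix as a unit (non-empty, all hashes, length at most 6).
import Mathlib
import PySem

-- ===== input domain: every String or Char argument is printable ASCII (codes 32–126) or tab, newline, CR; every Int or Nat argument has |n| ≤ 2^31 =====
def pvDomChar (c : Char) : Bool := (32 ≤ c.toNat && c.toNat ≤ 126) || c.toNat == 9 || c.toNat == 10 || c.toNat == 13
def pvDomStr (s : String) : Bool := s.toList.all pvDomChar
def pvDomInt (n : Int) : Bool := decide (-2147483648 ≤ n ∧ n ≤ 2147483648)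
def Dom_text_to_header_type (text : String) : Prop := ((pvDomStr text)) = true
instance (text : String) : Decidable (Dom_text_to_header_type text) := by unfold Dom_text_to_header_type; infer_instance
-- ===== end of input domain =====

-- B validates the prefix before the first space as a unit instead of counting hashes and indexing; same O(n) cost, simpler shape.

-- ===== PORT A =====
-- the 'for char in text: if char == "#": hash_count += 1 else: break' loop
def pvCntHash : List Char → Nat
  | [] => 0
  | c :: rest => if c = '#' then pvCntHash rest + 1 else 0

def text_to_header_type (text : String) : Option String :=
  let t := PySem.Str.strip text
  if !(PySem.Str.startswith t "#") then none
  else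
    let h := pvCntHash t.toList
    if h > 6 then none
    else if decide (PySem.Str.len t ≤ (h : Int)) || !(decide (PySem.List.pyGet? t.toList (h : Int) = some ' ')) then none
    else some ("h" ++ PySem.Int.toStr (h : Int))

-- ===== PORT B =====
def text_to_header_type_alt (text : String) : Option String :=
  let l := (PySem.Str.strip text).toList
  -- prefix, sep, _rest = text.partition(" "): prefix = chars before the first space,
  -- sep == " " exactly when a space exists, i.e. the prefix is shorter than the whole
  let pfx := l.takeWhile (fun c => !(c = ' '))
  if pfx.length = l.length then none               -- sep != " "
  else
    let n := pfx.length
    if n < 1 || 6 < n || !(pfx.all (fun c => c = '#')) then none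
    else some ("h" ++ PySem.Int.toStr (n : Int))

-- ===== PRECONDITION & SPEC =====
def Spec_text_to_header_type (text : String) (out : Option String) : Prop := out = text_to_header_type_alt text
instance (text : String) (out : Option String) : Decidable (Spec_text_to_header_type text out) := by unfold Spec_text_to_header_type; infer_instance

-- ===== CLAIM (what is proved, stated in full; the proofs are below) =====
def Claim_equal_text_to_header_type : Prop := ∀ (text : String), Dom_text_to_header_type text → Spec_text_to_header_type text (text_to_header_type text)

-- ===== LEMMAS AND PROOFS =====

-- the "is a header" shape: n hashes (1..6) followed by a space
def pvGood (l : List Char) (n : Nat) : Prop :=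
  1 ≤ n ∧ n ≤ 6 ∧ l.take n = List.replicate n '#' ∧ l[n]? = some ' '

lemma pvCntHash_of (l : List Char) (n : Nat)
    (ht : l.take n = List.replicate n '#') (hs : l[n]? = some ' ') :
    pvCntHash l = n := by
  induction n generalizing l with
  | zero =>
    cases l with
    | nil => simp at hs
    | cons c rest =>
      simp at hs
      simp [pvCntHash, hs]
  | succ m ih =>
    cases l with
    | nil => simp at hs
    | cons c rest =>
      simp [List.replicate_succ] at ht
      obtain ⟨hc, hrest⟩ := ht
      simp at hs
      simp [pvCntHash, hc, ih rest hrest hs]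

lemma pvCntHash_take (l : List Char) : l.take (pvCntHash l) = List.replicate (pvCntHash l) '#' := by
  induction l with
  | nil => simp [pvCntHash]
  | cons c rest ih =>
    by_cases hc : c = '#'
    · simp [pvCntHash, hc, List.replicate_succ, ih]
    · simp [pvCntHash, hc]

lemma pvTw_of (l : List Char) (n : Nat)
    (ht : l.take n = List.replicate n '#') (hs : l[n]? = some ' ') :
    l.takeWhile (fun c => !(c = ' ')) = List.replicate n '#' := by
  induction n generalizing l with
  | zero =>
    cases l with
    | nil => simp at hs
    | cons c rest =>
      simp at hs
      simp [List.takeWhile, hs]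
  | succ m ih =>
    cases l with
    | nil => simp at hs
    | cons c rest =>
      simp [List.replicate_succ] at ht
      obtain ⟨hc, hrest⟩ := ht
      simp at hs
      simp [List.takeWhile, hc, List.replicate_succ, ih rest hrest hs]

lemma pvTw_next (l : List Char) (c : Char)
    (h : l[(l.takeWhile (fun c => !(c = ' '))).length]? = some c) : c = ' ' := by
  induction l with
  | nil => simp at h
  | cons a rest ih =>
    by_cases ha : a = ' '
    · simp [List.takeWhile, ha] at h
      exact h.symm
    · simp [List.takeWhile, ha] at h
      exact ih (by simpa using h)

-- list-level views of the two ports (proof helpers)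
def pvA (l : List Char) : Option String :=
  if !(PySem.Chars.startswith l ['#']) then none
  else
    let hc := pvCntHash l
    if hc > 6 then none
    else if decide ((l.length : Int) ≤ (hc : Int)) || !(decide (PySem.List.pyGet? l (hc : Int) = some ' ')) then none
    else some ("h" ++ PySem.Int.toStr (hc : Int))

def pvB (l : List Char) : Option String :=
  let pfx := l.takeWhile (fun c => !(c = ' '))
  if pfx.length = l.length then none
  else
    let n := pfx.length
    if n < 1 || 6 < n || !(pfx.all (fun c => c = '#')) then none
    else some ("h" ++ PySem.Int.toStr (n : Int))

lemma pvA_eq (text : String) : text_to_header_type text = pvA (PySem.Str.strip text).toList := by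
  unfold text_to_header_type pvA
  simp only [PySem.Str.startswith_eq, PySem.Str.len_eq]
  rfl

lemma pvB_eq (text : String) : text_to_header_type_alt text = pvB (PySem.Str.strip text).toList := rfl

lemma pv_a_some (l : List Char) (s : String) (h : pvA l = some s) :
    ∃ n, pvGood l n ∧ s = "h" ++ PySem.Int.toStr (n : Int) := by
  by_cases hsw : PySem.Chars.startswith l ['#'] = true
  · simp [pvA, hsw] at h
    obtain ⟨h6, ⟨hlt, hget⟩, hs⟩ := h
    have hpos : 1 ≤ pvCntHash l := by
      rcases (PySem.Chars.startswith_iff l ['#']).mp hsw with ⟨rest, hrest⟩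
      subst hrest
      simp [pvCntHash]
    exact ⟨pvCntHash l, ⟨hpos, h6, pvCntHash_take l, hget⟩, hs.symm⟩
  · simp [pvA, eq_false_of_ne_true hsw] at h

lemma pv_b_some (l : List Char) (s : String) (h : pvB l = some s) :
    ∃ n, pvGood l n ∧ s = "h" ++ PySem.Int.toStr (n : Int) := by
  simp only [pvB] at h
  set pfx := l.takeWhile (fun c => !(c = ' ')) with hpfx
  split_ifs at h with h1 h2
  simp only [Bool.not_eq_true, Bool.or_eq_false_iff, decide_eq_false_iff_not, Bool.not_eq_false',
    not_lt] at h2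
  have hle : pfx.length ≤ l.length := by
    simpa [hpfx] using List.takeWhile_prefix (p := fun c => !(c = ' ')) (l := l) |>.length_le
  have hlt : pfx.length < l.length := lt_of_le_of_ne hle h1
  obtain ⟨c, hc⟩ : ∃ c, l[pfx.length]? = some c :=
    ⟨l[pfx.length], List.getElem?_eq_getElem hlt⟩
  have hsp : c = ' ' := pvTw_next l c (by simpa [hpfx] using hc)
  subst hsp
  have hall : ∀ b ∈ pfx, b = '#' := by
    intro b hb
    have := h2.2
    rw [List.all_eq_true] at this
    simpa using this b hb
  have hrep : pfx = List.replicate pfx.length '#' :=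
    List.eq_replicate_iff.mpr ⟨rfl, hall⟩
  have htake : l.take pfx.length = List.replicate pfx.length '#' := by
    have hp : pfx <+: l := by
      simpa [hpfx] using List.takeWhile_prefix (p := fun c => !(c = ' ')) (l := l)
    calc l.take pfx.length = pfx := (List.prefix_iff_eq_take.mp hp).symm
      _ = List.replicate pfx.length '#' := hrep
  refine ⟨pfx.length, ⟨?_, ?_, htake, hc⟩, ?_⟩
  · omega
  · omega
  · exact (Option.some.injEq _ _ ▸ h).symm

lemma pv_aEval (l : List Char) (n : Nat) (hg : pvGood l n) :
    pvA l = some ("h" ++ PySem.Int.toStr (n : Int)) := by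
  obtain ⟨h1, h6, htake, hget⟩ := hg
  have hcnt : pvCntHash l = n := pvCntHash_of l n htake hget
  have hlt : n < l.length := by
    by_contra hge
    rw [List.getElem?_eq_none (by omega)] at hget
    simp at hget
  have hsw : PySem.Chars.startswith l ['#'] = true := by
    rw [PySem.Chars.startswith_iff]
    rcases l with _ | ⟨c, rest⟩
    · simp at hlt
    · have hkt : (c :: rest).take n = List.replicate n '#' := htake
      rcases n with _ | m
      · omega
      · simp [List.replicate_succ] at hkt
        simp [hkt.1]
  simp [pvA, hsw, hcnt, hget]
  omega

lemma pv_bEval (l : List Char) (n : Nat) (hg : pvGood l n) :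
    pvB l = some ("h" ++ PySem.Int.toStr (n : Int)) := by
  obtain ⟨h1, h6, htake, hget⟩ := hg
  have htw : l.takeWhile (fun c => !(c = ' ')) = List.replicate n '#' := pvTw_of l n htake hget
  have hlt : n < l.length := by
    by_contra hge
    rw [List.getElem?_eq_none (by omega)] at hget
    simp at hget
  simp [pvB, htw]
  omega

lemma pv_main (l : List Char) : pvA l = pvB l := by
  by_cases hex : ∃ n, pvGood l n
  · obtain ⟨n, hg⟩ := hex
    rw [pv_aEval l n hg, pv_bEval l n hg]
  · cases ha : pvA l with
    | some s =>
      obtain ⟨n, hg, _⟩ := pv_a_some l s ha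
      exact absurd ⟨n, hg⟩ hex
    | none =>
      cases hb : pvB l with
      | some s =>
        obtain ⟨n, hg, _⟩ := pv_b_some l s hb
        exact absurd ⟨n, hg⟩ hex
      | none => rfl

-- ===== VERDICT (by name: the statement is the Claim_ definition above) =====
theorem text_to_header_type_spec : Claim_equal_text_to_header_type := by
  intro text _
  unfold Spec_text_to_header_type
  rw [pvA_eq, pvB_eq, pv_main]
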